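-- pv_equiv track=rewrite | github.com/abbasyadollahi/leetcode | interview/amazon/smallest_greater_non_adjacent_string.py | solve
-- ===== SOURCE A (Python) =====
-- import string
--
-- def solve(s: str) -> str:
--     index = 1
--     reset = False
--     reset_index = 0
--     characters = list(s)
--     while index < len(characters):
--         if reset:
--             characters[index] = string.ascii_lowercase[reset_index % 2]
--             reset_index += 1
--         elif characters[index - 1] >= characters[index]:
--             reset = True
--             while characters[index] == "z":
--                 if index == 0:
--                     return "-1"
--                 index -= 1
--
--             characters[index] = chr(ord(characters[index]) + 1)
--         index += 1
--
--     return "".join(characters)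
-- ===== SOURCE B (Python) =====
-- def solve(s: str) -> str:
--     j = -1  # index of the last non-'z' character seen so far
--     prev = ''
--     for k, c in enumerate(s):
--         if c != 'z':
--             j = k
--         if k and prev >= c:
--             if j < 0:
--                 return "-1"
--             tail = ('ab' * len(s))[:len(s) - j - 1]
--             return s[:j] + chr(ord(s[j]) + 1) + tail
--         prev = c
--     return s
-- ===== Notes on version B (the rewrite author's own statement) =====
-- stated objective: faster
-- what changed: A's flag-driven loop with an inner backward while over z-characters and a per-character fill phase is replaced by a single forward pass that maintains the index of the last non-z character as an accumulator (so the backtracking scan disappears) and builds the result with bulk slicing of a repeated two-letter pattern instead of mutating a list cell by cell and joining.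
import Mathlib
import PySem

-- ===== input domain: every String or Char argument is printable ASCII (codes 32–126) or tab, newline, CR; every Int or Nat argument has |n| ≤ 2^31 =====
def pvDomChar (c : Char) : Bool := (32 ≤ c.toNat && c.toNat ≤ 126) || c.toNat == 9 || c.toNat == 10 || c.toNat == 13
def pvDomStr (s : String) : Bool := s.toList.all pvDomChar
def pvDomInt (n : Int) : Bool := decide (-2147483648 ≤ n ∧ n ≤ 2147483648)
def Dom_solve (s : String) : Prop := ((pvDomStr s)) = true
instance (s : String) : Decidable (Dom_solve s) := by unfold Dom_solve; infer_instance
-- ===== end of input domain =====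

-- B replaces A's flag loop + backward 'z' scan + fill loop by ONE forward pass that maintains
-- the last non-'z' index as an accumulator and builds the tail arithmetically; same O(n) cost.

-- ===== PORT A =====
-- string.ascii_lowercase
def azList : List Char := "abcdefghijklmnopqrstuvwxyz".toList

-- the 'reset' phase of A's while loop: characters[index] = ascii_lowercase[reset_index % 2]
def aFill (cs : List Char) (i r : Nat) : List Char :=
  if h : i < cs.length then
    aFill (cs.set i (azList.getD (r % 2) 'a')) (i + 1) (r + 1)
  else cs
termination_by cs.length - i
decreasing_by simp_all; omega

-- the inner 'while characters[index] == "z"' backtracking loop; none = the "-1" return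
def aBack (cs : List Char) (i : Nat) : Option Nat :=
  if cs.getD i 'a' == 'z' then
    match i with
    | 0 => none
    | j + 1 => aBack cs j
  else some i

-- the outer while loop before 'reset' is set (index starts at 1, always in bounds)
def aScan (cs : List Char) (i : Nat) : String :=
  if _h : i < cs.length then
    if cs.getD (i - 1) 'a' ≥ cs.getD i 'a' then
      match aBack cs i with
      | none => "-1"
      | some j =>
          String.ofList (aFill (cs.set j (Char.ofNat ((cs.getD j 'a').toNat + 1))) (j + 1) 0)
    else aScan cs (i + 1)
  else String.ofList cs

def solve (s : String) : String := aScan s.toList 1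

-- ===== PORT B =====
-- the single for-loop of Source B: k = current index, j = last non-'z' index so far (-1 if none),
-- prev = previous character (unused while k = 0, as in Python where prev = '')
def bGo (s : String) (cs : List Char) (rest : List Char) (k : Nat) (j : Int) (prev : Char) :
    String :=
  match rest with
  | [] => s
  | c :: rs =>
      let j' := if c == 'z' then j else (k : Int)
      if k ≠ 0 ∧ prev ≥ c then
        if j' < 0 then "-1"
        else
          -- s[:j] + chr(ord(s[j]) + 1) + ('ab' * len(s))[:len(s) - j - 1]
          String.ofList (cs.take j'.toNat ++
            [Char.ofNat ((cs.getD j'.toNat 'a').toNat + 1)] ++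
            ((List.replicate cs.length ['a', 'b']).flatten.take (cs.length - j'.toNat - 1)))
      else bGo s cs rs (k + 1) j' c

def solve_alt (s : String) : String := bGo s s.toList s.toList 0 (-1) 'a'

-- ===== PRECONDITION & SPEC =====
def Spec_solve (s : String) (out : String) : Prop := out = solve_alt s
instance (s : String) (out : String) : Decidable (Spec_solve s out) := by unfold Spec_solve; infer_instance

-- ===== CLAIM (what is proved, stated in full; the proofs are below) =====
def Claim_equal_solve : Prop := ∀ (s : String), Dom_solve s → Spec_solve s (solve s)

-- ===== LEMMAS AND PROOFS =====

-- proof-side: first k in range(i, n) with cs[k-1] >= cs[k]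
def bFind (cs : List Char) (k : Nat) : Option Nat :=
  if _h : k < cs.length then
    if cs.getD (k - 1) 'a' ≥ cs.getD k 'a' then some k else bFind cs (k + 1)
  else none
termination_by cs.length - k

def altPat (m : Nat) : List Char :=
  (List.range m).map (fun k => if k % 2 == 0 then 'a' else 'b')

def altPatFrom (r m : Nat) : List Char :=
  (List.range m).map (fun k => if (r + k) % 2 == 0 then 'a' else 'b')

theorem altPatFrom_zero (m : Nat) : altPatFrom 0 m = altPat m := by
  simp [altPatFrom, altPat]

theorem az_getD (r : Nat) :
    azList.getD (r % 2) 'a' = if r % 2 == 0 then 'a' else 'b' := by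
  rcases Nat.mod_two_eq_zero_or_one r with h | h <;> simp [h, azList]

theorem altPatFrom_succ (r m : Nat) :
    altPatFrom r (m + 1) = (if r % 2 == 0 then 'a' else 'b') :: altPatFrom (r + 1) m := by
  simp [altPatFrom, List.range_succ_eq_map, List.map_map, Function.comp_def]
  intro k _
  have : r + (k + 1) = (r + 1) + k := by omega
  rw [this]

theorem altPatFrom_two (m : Nat) : altPatFrom 2 m = altPat m := by
  unfold altPatFrom altPat
  apply List.map_congr_left
  intro k _
  have : (2 + k) % 2 = k % 2 := Nat.add_mod_left 2 k
  rw [this]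

theorem altPat_succ_succ (m : Nat) : altPat (m + 2) = 'a' :: 'b' :: altPat m := by
  rw [← altPatFrom_zero, (by rfl : m + 2 = (m + 1) + 1), altPatFrom_succ, altPatFrom_succ,
    altPatFrom_two]
  simp

theorem flatten_replicate_ab (n : Nat) :
    (List.replicate n ['a', 'b']).flatten = altPat (2 * n) := by
  induction n with
  | zero => simp [altPat]
  | succ n ih =>
      rw [List.replicate_succ, List.flatten_cons, ih]
      have h2 : 2 * (n + 1) = 2 * n + 2 := by omega
      rw [h2, altPat_succ_succ]
      simp

theorem take_altPat (N m : Nat) (h : m ≤ N) : (altPat N).take m = altPat m := by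
  unfold altPat
  rw [← List.map_take, List.take_range, Nat.min_eq_left h]

theorem ab_take (n m : Nat) (h : m ≤ 2 * n) :
    (List.replicate n ['a', 'b']).flatten.take m = altPat m := by
  rw [flatten_replicate_ab, take_altPat _ _ h]

theorem take_set_succ {α : Type} (ds : List α) (i : Nat) (c : α) (h : i < ds.length) :
    (ds.set i c).take (i + 1) = ds.take i ++ [c] := by
  rw [List.take_add_one]
  simp [h, List.take_set, List.set_eq_of_length_le]

theorem aFill_eq (ds : List Char) (i r : Nat) :
    aFill ds i r = ds.take i ++ altPatFrom r (ds.length - i) := by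
  induction ds, i, r using aFill.induct with
  | case1 ds i r h ih =>
      rw [aFill, dif_pos h, ih]
      have hlen : (ds.set i (azList.getD (r % 2) 'a')).length = ds.length := by simp
      rw [take_set_succ ds i _ h, hlen]
      have hm : ds.length - i = (ds.length - (i + 1)) + 1 := by omega
      rw [hm, altPatFrom_succ, az_getD]
      simp
  | case2 ds i r h =>
      rw [aFill, dif_neg h]
      have h0 : ds.length - i = 0 := by omega
      have hle : ds.length ≤ i := by omega
      simp [h0, altPatFrom, List.take_of_length_le hle]

-- characterisation of the backtrack loop via the 'z'-stripped reversed prefix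
theorem aBack_eq (cs : List Char) (i : Nat) (h : i < cs.length) :
    aBack cs i =
      (let tR := (cs.take (i + 1)).reverse.dropWhile (fun c => c == 'z');
       if tR = [] then none else some (tR.length - 1)) := by
  induction i with
  | zero =>
      have h0 : cs.take 1 = [cs[0]] := by
        cases cs with
        | nil => simp at h
        | cons a t => simp
      rw [aBack]
      simp only [h0, List.reverse_singleton]
      by_cases hz : cs[0] = 'z'
      · simp [List.dropWhile, hz, List.getD_eq_getElem?_getD, List.getElem?_eq_getElem h]
      · have hz' : (cs[0] == 'z') = false := by simp [hz]
        simp [List.dropWhile, hz', List.getD_eq_getElem?_getD, List.getElem?_eq_getElem h]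
  | succ k ih =>
      have hk : k < cs.length := by omega
      have hsplit : cs.take (k + 2) = cs.take (k + 1) ++ [cs[k + 1]] := by
        rw [List.take_add_one]
        simp [List.getElem?_eq_getElem h]
      have hrev : (cs.take (k + 2)).reverse = cs[k + 1] :: (cs.take (k + 1)).reverse := by
        rw [hsplit]; simp
      rw [aBack]
      by_cases hz : cs[k + 1] = 'z'
      · simp only [hrev, List.dropWhile]
        rw [ih hk]
        simp [hz, List.getD_eq_getElem?_getD, List.getElem?_eq_getElem h]
      · have hlen : ((cs.take (k + 1)).reverse).length = k + 1 := by
          simp; omega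
        simp [hrev, hz, List.getD_eq_getElem?_getD,
          List.getElem?_eq_getElem h, hlen]

theorem aBack_le (cs : List Char) (i : Nat) (h : i < cs.length) (j : Nat)
    (hj : aBack cs i = some j) : j < cs.length := by
  rw [aBack_eq cs i h] at hj
  simp only at hj
  split at hj
  · simp at hj
  · rename_i hne
    have hlen : ((cs.take (i + 1)).reverse.dropWhile (fun c => c == 'z')).length ≤ i + 1 := by
      calc ((cs.take (i + 1)).reverse.dropWhile (fun c => c == 'z')).length
          ≤ ((cs.take (i + 1)).reverse).length := List.length_dropWhile_le _ _
        _ ≤ i + 1 := by simp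
    simp only [Option.some.injEq] at hj
    omega

-- the common normal form both loops reduce to
def common (s : String) (cs : List Char) (k : Nat) : String :=
  match bFind cs k with
  | none => s
  | some i =>
      let tR := (cs.take (i + 1)).reverse.dropWhile (fun c => c == 'z')
      if tR = [] then "-1"
      else
        let j := tR.length - 1
        String.ofList (cs.take j ++ [Char.ofNat ((cs.getD j 'a').toNat + 1)] ++
          altPat (cs.length - j - 1))

theorem aScan_eq_aux (s : String) (cs : List Char) (hcs : cs = s.toList) (n : Nat) :
    ∀ i, cs.length - i ≤ n → aScan cs i = common s cs i := by
  induction n with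
  | zero =>
      intro i hle
      have h : ¬ i < cs.length := by omega
      rw [aScan, dif_neg h, common, bFind, dif_neg h]
      subst hcs; simp
  | succ n ih =>
      intro i hle
      by_cases h : i < cs.length
      · rw [aScan, dif_pos h, common, bFind, dif_pos h]
        by_cases hcond : cs.getD (i - 1) 'a' ≥ cs.getD i 'a'
        · rw [if_pos hcond, if_pos hcond]
          cases hb : aBack cs i with
          | none =>
              have hc := aBack_eq cs i h
              rw [hb] at hc
              simp only at hc
              split at hc
              · rename_i he
                simp only [he, if_pos]
              · simp at hc
          | some j =>
              have hc := aBack_eq cs i h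
              rw [hb] at hc
              simp only at hc
              split at hc
              · simp at hc
              · rename_i hne
                simp only [Option.some.injEq] at hc
                have hjlt : j < cs.length := aBack_le cs i h j hb
                simp only [hne, ← hc]
                rw [aFill_eq]
                have hlen : (cs.set j (Char.ofNat ((cs.getD j 'a').toNat + 1))).length = cs.length := by
                  simp
                rw [hlen, take_set_succ cs j _ hjlt, altPatFrom_zero]
                have h2 : cs.length - (j + 1) = cs.length - j - 1 := by omega
                rw [h2]
                simp
        · rw [if_neg hcond, if_neg hcond]
          rw [ih (i + 1) (by omega), common]
      · rw [aScan, dif_neg h, common, bFind, dif_neg h]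
        subst hcs; simp

-- B-side invariant: the accumulator j equals (length of the 'z'-stripped reversed prefix) - 1
def lastNZ (cs : List Char) (k : Nat) : Int :=
  (((cs.take k).reverse.dropWhile (fun c => c == 'z')).length : Int) - 1

theorem lastNZ_succ (cs : List Char) (k : Nat) (h : k < cs.length) :
    lastNZ cs (k + 1) = if cs[k] == 'z' then lastNZ cs k else (k : Int) := by
  have hsplit : cs.take (k + 1) = cs.take k ++ [cs[k]] := by
    rw [List.take_add_one]
    simp [List.getElem?_eq_getElem h]
  unfold lastNZ
  rw [hsplit]
  by_cases hz : cs[k] = 'z'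
  · simp [hz]
  · have hz' : (cs[k] == 'z') = false := by simp [hz]
    have hlen : ((cs.take k).reverse).length = k := by simp; omega
    have hdw : List.dropWhile (fun c => c == 'z') ((cs.take k ++ [cs[k]]).reverse) =
        cs[k] :: (cs.take k).reverse := by
      rw [List.reverse_append]
      simp [hz']
    rw [hdw]
    simp [hz', hlen]

theorem bGo_eq (s : String) (cs : List Char) (n : Nat) :
    ∀ k, cs.length - k ≤ n → 1 ≤ k →
      bGo s cs (cs.drop k) k (lastNZ cs k) (cs.getD (k - 1) 'a') = common s cs k := by
  induction n with
  | zero =>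
      intro k hn _
      have h : ¬ k < cs.length := by omega
      have hd : cs.drop k = [] := List.drop_eq_nil_of_le (by omega)
      rw [hd, bGo, common, bFind, dif_neg h]
  | succ n ih =>
      intro k hn hk1
      by_cases h : k < cs.length
      · have hd : cs.drop k = cs[k] :: cs.drop (k + 1) := List.drop_eq_getElem_cons h
        rw [hd, bGo]
        have hj' : (if cs[k] == 'z' then lastNZ cs k else (k : Int)) = lastNZ cs (k + 1) :=
          (lastNZ_succ cs k h).symm
        have hgk : cs.getD k 'a' = cs[k] := List.getD_eq_getElem cs 'a' h
        by_cases hcond : cs.getD (k - 1) 'a' ≥ cs.getD k 'a'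
        · have hcond' : cs.getD (k - 1) 'a' ≥ cs[k] := by rwa [hgk] at hcond
          rw [if_pos ⟨by omega, hcond'⟩, common, bFind, dif_pos h, if_pos hcond]
          simp only [hj']
          set tR := (cs.take (k + 1)).reverse.dropWhile (fun c => c == 'z') with htR
          have hlz : lastNZ cs (k + 1) = (tR.length : Int) - 1 := rfl
          by_cases hnil : tR = []
          · have : lastNZ cs (k + 1) < 0 := by rw [hlz, hnil]; simp
            rw [if_pos this, hnil, if_pos rfl]
          · have hpos : 0 < tR.length := List.length_pos_of_ne_nil hnil
            have hnneg : ¬ lastNZ cs (k + 1) < 0 := by rw [hlz]; omega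
            rw [if_neg hnneg, if_neg hnil]
            have htn : (lastNZ cs (k + 1)).toNat = tR.length - 1 := by rw [hlz]; omega
            rw [htn]
            congr 1
            have hbound : cs.length - (tR.length - 1) - 1 ≤ 2 * cs.length := by omega
            rw [ab_take _ _ hbound]
        · have hcond' : ¬ (k ≠ 0 ∧ cs.getD (k - 1) 'a' ≥ cs[k]) := by
            rw [← hgk]; intro hx; exact hcond hx.2
          rw [if_neg hcond', common, bFind, dif_pos h, if_neg hcond, ← common]
          have hstep := ih (k + 1) (by omega) (by omega)
          simp only [Nat.add_sub_cancel] at hstep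
          rw [hj']
          rw [hgk] at hstep
          exact hstep
      · have hd : cs.drop k = [] := List.drop_eq_nil_of_le (by omega)
        rw [hd, bGo, common, bFind, dif_neg h]

-- ===== VERDICT (by name: the statement is the Claim_ definition above) =====
theorem solve_spec : Claim_equal_solve := by
  intro s _
  unfold Spec_solve solve solve_alt
  rw [aScan_eq_aux s s.toList rfl s.toList.length 1 (by omega)]
  cases s.toList with
  | nil =>
      have hb : bFind ([] : List Char) 1 = none := by rw [bFind]; simp
      unfold common
      rw [hb]
      rfl
  | cons c rs =>
      have h0 : 0 < (c :: rs).length := by simp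
      rw [bGo]
      rw [if_neg (by simp : ¬ ((0 : Nat) ≠ 0 ∧ 'a' ≥ c))]
      have hj1 : (if c == 'z' then (-1 : Int) else ((0 : Nat) : Int)) = lastNZ (c :: rs) 1 := by
        rw [lastNZ_succ (c :: rs) 0 h0]
        simp [lastNZ]
      rw [hj1]
      exact (bGo_eq s (c :: rs) (c :: rs).length 1 (by omega) (by omega)).symm
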